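-- pv_equiv track=rewrite | github.com/mgboot/morpho-phono | rhyme_analysis.py | _consonants_compatible
-- ===== SOURCE A (Python) =====
-- def _base(phone):
--     """Strip stress digit from an ARPAbet phone."""
--     return phone.rstrip("012")
--
-- _CONSONANT_CLASS = {
--     "P": "LB_STOP", "B": "LB_STOP",
--     "T": "AL_STOP", "D": "AL_STOP",
--     "K": "VL_STOP", "G": "VL_STOP",
--     "F": "LD_FRIC", "V": "LD_FRIC",
--     "TH": "DN_FRIC", "DH": "DN_FRIC",
--     "S": "AL_FRIC", "Z": "AL_FRIC",
--     "SH": "PA_FRIC", "ZH": "PA_FRIC",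
--     "CH": "AFFR", "JH": "AFFR",
--     "M": "LB_NAS", "N": "AL_NAS", "NG": "VL_NAS",
--     "L": "LAT", "R": "RHOT",
--     "HH": "GLOT", "W": "LB_GLI", "Y": "PL_GLI",
-- }
--
-- _VOWEL_CLASS = {
--     "IY": "FRONT_HI", "IH": "FRONT_HI",
--     "EY": "FRONT_MD", "EH": "FRONT_MD",
--     "AE": "FRONT_LO",
--     "AH": "CENTRAL", "ER": "CENTRAL",
--     "UW": "BACK_HI", "UH": "BACK_HI",
--     "OW": "BACK_MD", "AO": "BACK_MD",
--     "AA": "BACK_LO",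
--     "AY": "DIPH_AY", "AW": "DIPH_AW", "OY": "DIPH_OY",
-- }
--
-- def _soundex(phone):
--     b = _base(phone)
--     return _VOWEL_CLASS.get(b) or _CONSONANT_CLASS.get(b, b)
--
-- def _edit_distance_le_one(a, b):
--     """True if *a* and *b* differ by at most one insertion or deletion."""
--     if a == b:
--         return True
--     if abs(len(a) - len(b)) != 1:
--         return False
--     longer, shorter = (a, b) if len(a) > len(b) else (b, a)
--     for i in range(len(longer)):
--         if longer[:i] + longer[i + 1:] == shorter:
--             return True
--     return False
--
-- def _consonants_compatible(segments):
--     """True if consonant segments from every tail are compatible.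
--
--     Allows exact match, soundex-class match, or a single consonant
--     insertion / deletion across any pair.
--
--     Returns ``(ok, fuzzy_needed)``.
--     """
--     if len(segments) < 2:
--         return True, False
--
--     ref_base = [_base(c) for c in segments[0]]
--     fuzzy_needed = False
--
--     for seg in segments[1:]:
--         other_base = [_base(c) for c in seg]
--         if ref_base == other_base:
--             continue
--
--         # Soundex-class match
--         ref_sx = [_soundex(c) for c in segments[0]]
--         other_sx = [_soundex(c) for c in seg]
--         if ref_sx == other_sx:
--             fuzzy_needed = True
--             continue
--
--         # Allow one insertion / deletion (base or soundex level)
--         if _edit_distance_le_one(ref_base, other_base):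
--             fuzzy_needed = True
--             continue
--         if _edit_distance_le_one(ref_sx, other_sx):
--             fuzzy_needed = True
--             continue
--
--         return False, False
--
--     return True, fuzzy_needed
-- ===== SOURCE B (Python) =====
-- def _base(phone):
--     return phone.rstrip("012")
--
-- _CONSONANT_CLASS = {
--     "P": "LB_STOP", "B": "LB_STOP",
--     "T": "AL_STOP", "D": "AL_STOP",
--     "K": "VL_STOP", "G": "VL_STOP",
--     "F": "LD_FRIC", "V": "LD_FRIC",
--     "TH": "DN_FRIC", "DH": "DN_FRIC",
--     "S": "AL_FRIC", "Z": "AL_FRIC",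
--     "SH": "PA_FRIC", "ZH": "PA_FRIC",
--     "CH": "AFFR", "JH": "AFFR",
--     "M": "LB_NAS", "N": "AL_NAS", "NG": "VL_NAS",
--     "L": "LAT", "R": "RHOT",
--     "HH": "GLOT", "W": "LB_GLI", "Y": "PL_GLI",
-- }
--
-- _VOWEL_CLASS = {
--     "IY": "FRONT_HI", "IH": "FRONT_HI",
--     "EY": "FRONT_MD", "EH": "FRONT_MD",
--     "AE": "FRONT_LO",
--     "AH": "CENTRAL", "ER": "CENTRAL",
--     "UW": "BACK_HI", "UH": "BACK_HI",
--     "OW": "BACK_MD", "AO": "BACK_MD",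
--     "AA": "BACK_LO",
--     "AY": "DIPH_AY", "AW": "DIPH_AW", "OY": "DIPH_OY",
-- }
--
-- def _soundex(phone):
--     b = _base(phone)
--     return _VOWEL_CLASS.get(b) or _CONSONANT_CLASS.get(b, b)
--
-- def _one_edit(a, b):
--     """At most one insertion/deletion apart: two-pointer skip-common-prefix check."""
--     if len(a) == len(b):
--         return a == b
--     if len(a) < len(b):
--         a, b = b, a
--     if len(a) != len(b) + 1:
--         return False
--     i = 0
--     while i < len(b) and a[i] == b[i]:
--         i += 1
--     return a[i + 1:] == b[i:]
--
-- def _consonants_compatible(segments):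
--     if len(segments) < 2:
--         return True, False
--     ref_b = [_base(c) for c in segments[0]]
--     ref_s = [_soundex(c) for c in segments[0]]
--
--     def grade(seg):
--         ob = [_base(c) for c in seg]
--         if ob == ref_b:
--             return 0
--         os = [_soundex(c) for c in seg]
--         if os == ref_s or _one_edit(ref_b, ob) or _one_edit(ref_s, os):
--             return 1
--         return 2
--
--     grades = [grade(seg) for seg in segments[1:]]
--     if 2 in grades:
--         return False, False
--     return True, 1 in grades
-- ===== Notes on version B (the rewrite author's own statement) =====
-- stated objective: alternative
-- what changed: B replaces A's accumulator loop with early return by a staged pass that maps every tail segment to a compatibility grade (exact/fuzzy/incompatible) and then answers with two membership tests, hoists segments[0]'s soundex list out of the per-segment work, and replaces the delete-each-position single-edit scan by a two-pointer skip-common-prefix check.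
import Mathlib
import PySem

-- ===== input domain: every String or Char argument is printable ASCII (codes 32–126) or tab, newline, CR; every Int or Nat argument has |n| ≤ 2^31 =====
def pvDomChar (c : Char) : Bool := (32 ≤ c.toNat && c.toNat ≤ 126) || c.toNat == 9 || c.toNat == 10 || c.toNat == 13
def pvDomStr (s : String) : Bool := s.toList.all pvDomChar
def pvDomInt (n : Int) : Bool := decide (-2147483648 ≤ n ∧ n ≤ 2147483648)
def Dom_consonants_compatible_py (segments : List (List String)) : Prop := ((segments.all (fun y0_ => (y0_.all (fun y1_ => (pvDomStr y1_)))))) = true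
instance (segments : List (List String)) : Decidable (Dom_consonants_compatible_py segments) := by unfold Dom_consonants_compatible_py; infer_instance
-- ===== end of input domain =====

-- B grades every tail segment (exact/fuzzy/incompatible) in one mapped pass and answers with two
-- membership tests instead of A's early-return accumulator loop; the single-edit check is a
-- two-pointer skip-common-prefix scan instead of trying every deletion position (objective: alternative).

-- ===== shared module helpers (_base, _CONSONANT_CLASS, _VOWEL_CLASS, _soundex: identical in Source A and Source B) =====

-- phone.rstrip("012"): hand port (PySem has no rstrip-with-chars); exact — drop trailing chars of "012".
def pvBase (phone : String) : String :=
  String.ofList ((phone.toList.reverse.dropWhile (fun c => c == '0' || c == '1' || c == '2')).reverse)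

def pvConsonantClass : PySem.Dict String String := PySem.Dict.ofList
  [("P", "LB_STOP"), ("B", "LB_STOP"), ("T", "AL_STOP"), ("D", "AL_STOP"),
   ("K", "VL_STOP"), ("G", "VL_STOP"), ("F", "LD_FRIC"), ("V", "LD_FRIC"),
   ("TH", "DN_FRIC"), ("DH", "DN_FRIC"), ("S", "AL_FRIC"), ("Z", "AL_FRIC"),
   ("SH", "PA_FRIC"), ("ZH", "PA_FRIC"), ("CH", "AFFR"), ("JH", "AFFR"),
   ("M", "LB_NAS"), ("N", "AL_NAS"), ("NG", "VL_NAS"),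
   ("L", "LAT"), ("R", "RHOT"),
   ("HH", "GLOT"), ("W", "LB_GLI"), ("Y", "PL_GLI")]

def pvVowelClass : PySem.Dict String String := PySem.Dict.ofList
  [("IY", "FRONT_HI"), ("IH", "FRONT_HI"), ("EY", "FRONT_MD"), ("EH", "FRONT_MD"),
   ("AE", "FRONT_LO"), ("AH", "CENTRAL"), ("ER", "CENTRAL"),
   ("UW", "BACK_HI"), ("UH", "BACK_HI"), ("OW", "BACK_MD"), ("AO", "BACK_MD"),
   ("AA", "BACK_LO"), ("AY", "DIPH_AY"), ("AW", "DIPH_AW"), ("OY", "DIPH_OY")]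

-- _VOWEL_CLASS.get(b) or _CONSONANT_CLASS.get(b, b): the stored class names are non-empty,
-- so Python's `or` falls through exactly on None.
def pvSoundex (phone : String) : String :=
  let b := pvBase phone
  match PySem.Dict.get? pvVowelClass b with
  | some v => v
  | none => PySem.Dict.getD pvConsonantClass b b

-- ===== PORT A =====

-- _edit_distance_le_one: loop over every deletion position of the longer list.
def editLeOne (a b : List String) : Bool :=
  if a == b then true
  else if ((a.length : Int) - (b.length : Int)).natAbs ≠ 1 then false
  else
    let ls := if a.length > b.length then (a, b) else (b, a)
    (PySem.List.pyRange 0 (ls.1.length : Int) 1).any fun i =>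
      (PySem.List.slice ls.1 none (some i) ++ PySem.List.slice ls.1 (some (i + 1)) none) == ls.2

-- the for-loop of _consonants_compatible, with its early `return False, False`
def consonantsALoop (seg0 : List String) (refBase : List String) :
    List (List String) → Bool → Bool × Bool
  | [], fuzzy => (true, fuzzy)
  | seg :: rest, fuzzy =>
    let otherBase := seg.map pvBase
    if refBase == otherBase then consonantsALoop seg0 refBase rest fuzzy
    else
      let refSx := seg0.map pvSoundex
      let otherSx := seg.map pvSoundex
      if refSx == otherSx then consonantsALoop seg0 refBase rest true
      else if editLeOne refBase otherBase then consonantsALoop seg0 refBase rest true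
      else if editLeOne refSx otherSx then consonantsALoop seg0 refBase rest true
      else (false, false)

def consonants_compatible_py (segments : List (List String)) : Bool × Bool :=
  match segments with
  | [] => (true, false)
  | [_] => (true, false)
  | seg0 :: rest => consonantsALoop seg0 (seg0.map pvBase) rest false

-- ===== PORT B =====

-- two-pointer: skip the common prefix, then the rest of the longer list (minus one) must equal the rest of the shorter
def oneDelScan : List String → List String → Bool
  | [], _ => false
  | _ :: xs, [] => xs == ([] : List String)
  | x :: xs, y :: ys => if x == y then oneDelScan xs ys else xs == (y :: ys)

def oneEdit (a b : List String) : Bool :=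
  if a.length == b.length then a == b
  else
    let ls := if a.length < b.length then (b, a) else (a, b)
    if ls.1.length ≠ ls.2.length + 1 then false
    else oneDelScan ls.1 ls.2

-- grade(seg): 0 = exact base match, 1 = fuzzy (soundex or one edit), 2 = incompatible
def pvGrade (refB refS : List String) (seg : List String) : Nat :=
  let ob := seg.map pvBase
  if ob == refB then 0
  else
    let os := seg.map pvSoundex
    if os == refS || oneEdit refB ob || oneEdit refS os then 1 else 2

def consonants_compatible_py_alt (segments : List (List String)) : Bool × Bool :=
  match segments with
  | seg0 :: rest@(_ :: _) =>
    let grades := rest.map (pvGrade (seg0.map pvBase) (seg0.map pvSoundex))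
    if grades.contains 2 then (false, false) else (true, grades.contains 1)
  | _ => (true, false)

-- ===== PRECONDITION & SPEC =====
def Spec_consonants_compatible_py (segments : List (List String)) (out : Bool × Bool) : Prop := out = consonants_compatible_py_alt segments
instance (segments : List (List String)) (out : Bool × Bool) : Decidable (Spec_consonants_compatible_py segments out) := by unfold Spec_consonants_compatible_py; infer_instance

-- ===== CLAIM (what is proved, stated in full; the proofs are below) =====
def Claim_equal_consonants_compatible_py : Prop := ∀ (segments : List (List String)), Dom_consonants_compatible_py segments → Spec_consonants_compatible_py segments (consonants_compatible_py segments)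

-- ===== LEMMAS AND PROOFS =====

-- two-pointer scan finds a deletion position iff one exists
theorem oneDelScan_iff (a b : List String) (h : a.length = b.length + 1) :
    oneDelScan a b = true ↔ ∃ k < a.length, a.take k ++ a.drop (k + 1) = b := by
  induction a generalizing b with
  | nil => simp at h
  | cons x xs ih =>
    cases b with
    | nil =>
      have hxs : xs = [] := by simpa using h
      subst hxs
      exact ⟨fun _ => ⟨0, by simp, rfl⟩, fun _ => by simp [oneDelScan]⟩
    | cons y ys =>
      simp only [List.length_cons] at h
      by_cases hxy : x = y
      · subst hxy
        simp only [oneDelScan, beq_self_eq_true, if_true, ih ys (by omega)]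
        constructor
        · rintro ⟨k, hk, hp⟩
          exact ⟨k + 1, by simpa using hk, by simpa using hp⟩
        · rintro ⟨k, hk, hp⟩
          cases k with
          | zero =>
            simp only [List.take_zero, List.nil_append, List.drop_succ_cons, List.drop_zero] at hp
            subst hp
            exact ⟨0, by simp, by simp⟩
          | succ k =>
            refine ⟨k, ?_, ?_⟩
            · simpa using hk
            · simpa using hp
      · have hb : (x == y) = false := beq_eq_false_iff_ne.mpr hxy
        simp only [oneDelScan, hb, Bool.false_eq_true, if_false, beq_iff_eq]
        constructor
        · intro hp
          exact ⟨0, by simp, by simpa using hp⟩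
        · rintro ⟨k, hk, hp⟩
          cases k with
          | zero => simpa using hp
          | succ k =>
            exfalso
            simp only [List.take_succ_cons, List.drop_succ_cons, List.cons_append,
              List.cons.injEq] at hp
            exact hxy hp.1

-- A's positional scan, reduced to the same existential
theorem editLeOne_any_iff (l s : List String) :
    ((PySem.List.pyRange 0 (l.length : Int) 1).any fun i =>
      (PySem.List.slice l none (some i) ++ PySem.List.slice l (some (i + 1)) none) == s) = true
    ↔ ∃ k < l.length, l.take k ++ l.drop (k + 1) = s := by
  rw [PySem.List.pyRange_one]
  simp only [Int.sub_zero, Int.toNat_natCast, List.any_map, List.any_eq_true, List.mem_range,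
    Function.comp]
  constructor
  · rintro ⟨k, hk, hp⟩
    refine ⟨k, hk, ?_⟩
    rw [show ((0:Int) + (k:Int)) = ((k:Nat) : Int) by omega] at hp
    rw [show ((k:Int) + 1) = (((k+1:Nat)) : Int) by push_cast; ring] at hp
    rw [PySem.List.slice_to_natCast, PySem.List.slice_from_natCast] at hp
    exact beq_iff_eq.mp hp
  · rintro ⟨k, hk, hp⟩
    refine ⟨k, hk, ?_⟩
    rw [show ((0:Int) + (k:Int)) = ((k:Nat) : Int) by omega]
    rw [show ((k:Int) + 1) = (((k+1:Nat)) : Int) by push_cast; ring]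
    rw [PySem.List.slice_to_natCast, PySem.List.slice_from_natCast]
    exact beq_iff_eq.mpr hp

theorem editLeOne_eq_oneEdit (a b : List String) : editLeOne a b = oneEdit a b := by
  unfold editLeOne oneEdit
  by_cases hab : a = b
  · subst hab; simp
  · have hne : (a == b) = false := beq_eq_false_iff_ne.mpr hab
    simp only [hne, Bool.false_eq_true, if_false]
    by_cases hlen : a.length = b.length
    · have : ((a.length : Int) - (b.length : Int)).natAbs ≠ 1 := by omega
      simp [hlen]
    · have hl : (a.length == b.length) = false := by simp [hlen]
      simp only [hl, Bool.false_eq_true, if_false]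
      by_cases hd : ((a.length : Int) - (b.length : Int)).natAbs = 1
      · rcases Nat.lt_or_ge a.length b.length with hc | hc
        · have hb1 : b.length = a.length + 1 := by omega
          have hgt : ¬ (a.length > b.length) := by omega
          have hlt : a.length < b.length := hc
          simp only [hd, if_pos hlt, if_neg hgt]
          rw [if_neg (by omega : ¬ (1:ℕ) ≠ 1), if_neg (by omega : ¬ b.length ≠ a.length + 1)]
          rw [Bool.eq_iff_iff, editLeOne_any_iff, oneDelScan_iff b a hb1]
        · have ha1 : a.length = b.length + 1 := by omega
          have hgt : a.length > b.length := by omega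
          have hlt : ¬ (a.length < b.length) := by omega
          simp only [hd, if_pos hgt, if_neg hlt]
          rw [if_neg (by omega : ¬ (1:ℕ) ≠ 1), if_neg (by omega : ¬ a.length ≠ b.length + 1)]
          rw [Bool.eq_iff_iff, editLeOne_any_iff, oneDelScan_iff a b ha1]
      · have h2 : a.length + 2 ≤ b.length ∨ b.length + 2 ≤ a.length := by omega
        simp only [if_pos hd]
        rcases h2 with h2 | h2
        · rw [if_pos (by omega : a.length < b.length)]
          rw [if_pos (by omega : b.length ≠ a.length + 1)]
        · rw [if_neg (by omega : ¬ a.length < b.length)]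
          rw [if_pos (by omega : a.length ≠ b.length + 1)]

-- A's early-return loop computes exactly B's grade-then-membership result
theorem loop_eq_grades (seg0 : List String) (rest : List (List String)) (fuzzy : Bool) :
    consonantsALoop seg0 (seg0.map pvBase) rest fuzzy
      = (let grades := rest.map (pvGrade (seg0.map pvBase) (seg0.map pvSoundex))
         if grades.contains 2 then (false, false) else (true, fuzzy || grades.contains 1)) := by
  induction rest generalizing fuzzy with
  | nil => simp [consonantsALoop]
  | cons seg rest ih =>
    simp only [List.map_cons]
    by_cases h1 : seg0.map pvBase = seg.map pvBase
    · have hg : pvGrade (seg0.map pvBase) (seg0.map pvSoundex) seg = 0 := by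
        simp [pvGrade, h1.symm]
      have hA : (seg0.map pvBase == seg.map pvBase) = true := beq_iff_eq.mpr h1
      rw [hg]
      simp only [consonantsALoop, hA, if_true]
      rw [ih fuzzy]
      simp
    · have hA : (seg0.map pvBase == seg.map pvBase) = false := beq_eq_false_iff_ne.mpr h1
      have hob : (seg.map pvBase == seg0.map pvBase) = false :=
        beq_eq_false_iff_ne.mpr (fun h => h1 h.symm)
      by_cases hfz : (seg.map pvSoundex == seg0.map pvSoundex
          || oneEdit (seg0.map pvBase) (seg.map pvBase)
          || oneEdit (seg0.map pvSoundex) (seg.map pvSoundex)) = true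
      · -- grade 1: one of the fuzzy conditions holds; A continues with fuzzy := true
        have hg : pvGrade (seg0.map pvBase) (seg0.map pvSoundex) seg = 1 := by
          simp only [pvGrade, hob, Bool.false_eq_true, if_false]
          rw [if_pos hfz]
        have hloop : consonantsALoop seg0 (seg0.map pvBase) (seg :: rest) fuzzy
            = consonantsALoop seg0 (seg0.map pvBase) rest true := by
          simp only [consonantsALoop, hA, Bool.false_eq_true, if_false,
            editLeOne_eq_oneEdit]
          rcases Bool.or_eq_true_iff.mp hfz with h | h4
          · rcases Bool.or_eq_true_iff.mp h with h2 | h3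
            · have : (seg0.map pvSoundex == seg.map pvSoundex) = true := by
                have := beq_iff_eq.mp h2; exact beq_iff_eq.mpr this.symm
              simp [this]
            · simp [h3]
          · simp [h4]
        rw [hg, hloop, ih true]
        simp
      · -- grade 2: incompatible; A returns early, B's head grade is 2
        have hg : pvGrade (seg0.map pvBase) (seg0.map pvSoundex) seg = 2 := by
          simp only [pvGrade, hob, Bool.false_eq_true, if_false]
          rw [if_neg (by simpa using hfz)]
        simp only [Bool.or_eq_true, not_or, Bool.not_eq_true] at hfz
        obtain ⟨⟨h2, h3⟩, h4⟩ := hfz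
        have h2' : (seg0.map pvSoundex == seg.map pvSoundex) = false := by
          refine beq_eq_false_iff_ne.mpr (fun h => ?_)
          rw [h] at h2; simp at h2
        simp only [consonantsALoop, hA, Bool.false_eq_true, if_false,
          editLeOne_eq_oneEdit, h2', h3, h4, hg]
        simp

-- ===== VERDICT (by name: the statement is the Claim_ definition above) =====
theorem consonants_compatible_py_spec : Claim_equal_consonants_compatible_py := by
  intro segments _
  unfold Spec_consonants_compatible_py
  match segments with
  | [] => rfl
  | [_] => rfl
  | seg0 :: s1 :: rest =>
    simp only [consonants_compatible_py, consonants_compatible_py_alt]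
    rw [loop_eq_grades seg0 (s1 :: rest) false]
    simp
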